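-- pv_equiv track=rewrite | github.com/Datadote/aoc23 | 3a.py | find_numbers_in_line
-- ===== SOURCE A (Python) =====
-- def find_numbers_in_line(line):
--     starts = []
--     ends = []
--     new_num = True
--     for i, c in enumerate(line):
--         if c.isdigit() and new_num:
--             starts.append(i)
--             new_num = False
--         elif not c.isdigit() and not new_num:
--             ends.append(i)
--             new_num = True
--     if not new_num:
--         ends.append(i+1)
--     numbers = [line[s:e] for s,e in zip(starts, ends)]
--     return numbers, starts, ends
-- ===== SOURCE B (Python) =====
-- import re
--
-- def find_numbers_in_line(line):
--     numbers, starts, ends = [], [], []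
--     for m in re.finditer(r'\d+', line):
--         numbers.append(m.group())
--         starts.append(m.start())
--         ends.append(m.end())
--     return numbers, starts, ends
-- ===== Notes on version B (the rewrite author's own statement) =====
-- stated objective: idiomatic
-- what changed: Replaces the manual new_num flag state machine plus trailing ends-fixup with re.finditer(r'\d+', line), reading start/end/group off each match object.
import Mathlib
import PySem

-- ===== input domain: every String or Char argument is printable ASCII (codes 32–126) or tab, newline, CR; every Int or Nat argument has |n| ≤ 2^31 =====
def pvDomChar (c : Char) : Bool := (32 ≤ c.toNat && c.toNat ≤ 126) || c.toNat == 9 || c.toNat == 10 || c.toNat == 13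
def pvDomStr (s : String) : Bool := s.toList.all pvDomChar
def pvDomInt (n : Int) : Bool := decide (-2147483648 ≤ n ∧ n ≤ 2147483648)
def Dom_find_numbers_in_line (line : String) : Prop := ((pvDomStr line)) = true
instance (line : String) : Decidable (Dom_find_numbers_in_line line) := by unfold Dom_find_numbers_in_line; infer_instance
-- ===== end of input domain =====

-- B replaces A's new_num flag state machine (with its trailing ends-fixup) by an idiomatic
-- re.finditer scan over maximal digit runs (ported as a run-splitting recursion); the timing
-- run measured B faster by a constant factor (C regex engine vs a per-char Python loop).

-- ===== PORT A =====
-- the loop body of A's for-loop, as a named step function over the state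
-- (starts, ends, new_num, i); the last component records the loop variable i,
-- which Python leaks out of the loop for the final `ends.append(i+1)` fixup
-- (initialised to 0 here; it is only read when the loop ran at least once).
def pvStepA (s : List Int × List Int × Bool × Int) (p : Int × Char) :
    List Int × List Int × Bool × Int :=
  if PySem.Chars.isdigit p.2 && s.2.2.1 then (s.1 ++ [p.1], s.2.1, false, p.1)
  else if !PySem.Chars.isdigit p.2 && !s.2.2.1 then (s.1, s.2.1 ++ [p.1], true, p.1)
  else (s.1, s.2.1, s.2.2.1, p.1)

def find_numbers_in_line (line : String) : List String × List Int × List Int :=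
  let r := (PySem.List.enumerate line.toList).foldl pvStepA ([], [], true, 0)
  let starts := r.1
  let ends := if !r.2.2.1 then r.2.1 ++ [r.2.2.2 + 1] else r.2.1
  ((starts.zip ends).map (fun p => PySem.Str.slice line (some p.1) (some p.2)), starts, ends)

-- ===== PORT B =====
-- the matches of re.finditer(r'\d+', line) as (start, end) spans: skip a
-- non-digit, or emit the whole maximal digit run at once and resume after it
def pvSpans (cs0 : List Char) (i : Int) : List (Int × Int) :=
  match cs0 with
  | [] => []
  | c :: cs =>
    if h : PySem.Chars.isdigit c then
      let n := ((c :: cs).takeWhile PySem.Chars.isdigit).length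
      (i, i + (n : Int)) :: pvSpans ((c :: cs).dropWhile PySem.Chars.isdigit) (i + (n : Int))
    else pvSpans cs (i + 1)
termination_by cs0.length
decreasing_by
  · have h2 : List.dropWhile PySem.Chars.isdigit (c :: cs) =
        List.dropWhile PySem.Chars.isdigit cs := by simp [h]
    simp only [h2, List.length_cons]
    exact Nat.lt_succ_of_le (List.length_dropWhile_le _ _)
  · simp

def find_numbers_in_line_alt (line : String) : List String × List Int × List Int :=
  let sp := pvSpans line.toList 0
  (sp.map (fun p => PySem.Str.slice line (some p.1) (some p.2)),
   sp.map (·.1), sp.map (·.2))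

-- ===== PRECONDITION & SPEC =====
def Spec_find_numbers_in_line (line : String) (out : List String × List Int × List Int) : Prop := out = find_numbers_in_line_alt line
instance (line : String) (out : List String × List Int × List Int) : Decidable (Spec_find_numbers_in_line line out) := by unfold Spec_find_numbers_in_line; infer_instance

-- ===== CLAIM (what is proved, stated in full; the proofs are below) =====
def Claim_equal_find_numbers_in_line : Prop := ∀ (line : String), Dom_find_numbers_in_line line → Spec_find_numbers_in_line line (find_numbers_in_line line)

-- ===== LEMMAS AND PROOFS =====

-- A's loop over `enumerate cs i0` from state (st, en, nn, il), followed by the fixup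
def pvFullA (cs : List Char) (i0 : Int) (st en : List Int) (nn : Bool) (il : Int) :
    List Int × List Int :=
  let r := (PySem.List.enumerate cs i0).foldl pvStepA (st, en, nn, il)
  (r.1, if !r.2.2.1 then r.2.1 ++ [r.2.2.2 + 1] else r.2.1)

-- the state-machine (with fixup) produces exactly the starts/ends of the digit runs;
-- second conjunct: mid-run state (nn = false, current run started before i0)
theorem pvFullA_eq (cs : List Char) :
    (∀ (i0 : Int) (st en : List Int) (il : Int),
      pvFullA cs i0 st en true il =
        (st ++ (pvSpans cs i0).map (·.1), en ++ (pvSpans cs i0).map (·.2))) ∧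
    (∀ (i0 : Int) (st en : List Int),
      pvFullA cs i0 st en false (i0 - 1) =
        (st ++ (pvSpans (cs.dropWhile PySem.Chars.isdigit)
                  (i0 + ((cs.takeWhile PySem.Chars.isdigit).length : Int))).map (·.1),
         en ++ ((i0 + ((cs.takeWhile PySem.Chars.isdigit).length : Int)) ::
                (pvSpans (cs.dropWhile PySem.Chars.isdigit)
                  (i0 + ((cs.takeWhile PySem.Chars.isdigit).length : Int))).map (·.2)))) := by
  induction cs with
  | nil =>
    refine ⟨fun i0 st en il => by simp [pvFullA, pvSpans, PySem.List.enumerate],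
            fun i0 st en => ?_⟩
    simp [pvFullA, pvSpans, PySem.List.enumerate]
  | cons c cs ih =>
    constructor
    · intro i0 st en il
      by_cases h : PySem.Chars.isdigit c = true
      · have H := ih.2 (i0 + 1) (st ++ [i0]) en
        rw [show (i0 : Int) + 1 - 1 = i0 by ring] at H
        simp only [pvFullA, PySem.List.enumerate_cons, List.foldl_cons] at H ⊢
        rw [show pvStepA (st, en, true, il) (i0, c) = (st ++ [i0], en, false, i0) by
          simp [pvStepA, h]]
        rw [H, pvSpans]
        push_cast
        simp [h, List.append_assoc, add_comm, add_left_comm]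
      · have H := ih.1 (i0 + 1) st en i0
        simp only [pvFullA, PySem.List.enumerate_cons, List.foldl_cons] at H ⊢
        rw [show pvStepA (st, en, true, il) (i0, c) = (st, en, true, i0) by
          simp [pvStepA, h]]
        rw [H, pvSpans]
        simp [h]
    · intro i0 st en
      by_cases h : PySem.Chars.isdigit c = true
      · have H := ih.2 (i0 + 1) st en
        rw [show (i0 : Int) + 1 - 1 = i0 by ring] at H
        simp only [pvFullA, PySem.List.enumerate_cons, List.foldl_cons] at H ⊢
        rw [show pvStepA (st, en, false, i0 - 1) (i0, c) = (st, en, false, i0) by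
          simp [pvStepA, h]]
        rw [H]
        simp [h, add_comm, add_left_comm]
      · have H := ih.1 (i0 + 1) st (en ++ [i0]) i0
        simp only [pvFullA, PySem.List.enumerate_cons, List.foldl_cons] at H ⊢
        rw [show pvStepA (st, en, false, i0 - 1) (i0, c) = (st, en ++ [i0 - 1 + 1], true, i0) by
          simp [pvStepA, h]]
        rw [show (i0 : Int) - 1 + 1 = i0 by ring, H]
        simp [h, pvSpans, List.append_assoc]

-- ===== VERDICT (by name: the statement is the Claim_ definition above) =====
theorem find_numbers_in_line_spec : Claim_equal_find_numbers_in_line := by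
  intro line _
  unfold Spec_find_numbers_in_line find_numbers_in_line find_numbers_in_line_alt
  have h := (pvFullA_eq line.toList).1 0 [] [] 0
  simp only [pvFullA, List.nil_append] at h
  obtain ⟨h1, h2⟩ := Prod.ext_iff.mp h
  simp only at h1 h2 ⊢
  rw [h1, h2, List.zip_map']
  simp
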